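-- pv_equiv track=rewrite | github.com/nguyenvothuan/C-Hashtag-Algorithm | LeetCodePython/sol_misc.py | prisonAfterNDaysTrash
-- ===== SOURCE A (Python) =====
-- from typing import List, Tuple
--
-- def prisonAfterNDaysTrash(cells: List[int], n: int) -> List[int]:
--     def hash(arr):
--         s = ''.join([str(e) for e in arr])
--         return s
--
--     def update(arr):
--         newarr = [0] * 8
--         for i in range(1, 7):
--             newarr[i] = 1 if arr[i - 1] == arr[i + 1] else 0
--         return newarr
--
--     d = dict()
--     for _ in range(n):
--         hashed = hash(cells)
--         if hashed in d.keys():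
--             cells = d[hashed]
--         else:
--             cells = update(cells)
--             d.setdefault(hashed, cells)
--     return cells
-- ===== SOURCE B (Python) =====
-- def prisonAfterNDaysTrash(cells, n):
--     # The day-transition is a function of the 8-cell state alone; every state
--     # reachable after one step has both border cells 0, and all such states
--     # cycle with period dividing 14.  So take one step, then only
--     # (n - 1) % 14 more -- O(1) instead of A's O(n) loop with a memo dict.
--     if n <= 0:
--         return cells
--     def step(a):
--         return [0] + [1 if a[i - 1] == a[i + 1] else 0 for i in range(1, 7)] + [0]
--     cells = step(cells)
--     for _ in range((n - 1) % 14):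
--         cells = step(cells)
--     return cells
-- ===== Notes on version B (the rewrite author's own statement) =====
-- stated objective: faster
-- what changed: B replaces A's n-iteration loop with a string-keyed memo dict by the closed-form cycle length: one step into the period-14 cycle, then (n-1) % 14 further steps, at most 14 updates total.
import Mathlib
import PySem

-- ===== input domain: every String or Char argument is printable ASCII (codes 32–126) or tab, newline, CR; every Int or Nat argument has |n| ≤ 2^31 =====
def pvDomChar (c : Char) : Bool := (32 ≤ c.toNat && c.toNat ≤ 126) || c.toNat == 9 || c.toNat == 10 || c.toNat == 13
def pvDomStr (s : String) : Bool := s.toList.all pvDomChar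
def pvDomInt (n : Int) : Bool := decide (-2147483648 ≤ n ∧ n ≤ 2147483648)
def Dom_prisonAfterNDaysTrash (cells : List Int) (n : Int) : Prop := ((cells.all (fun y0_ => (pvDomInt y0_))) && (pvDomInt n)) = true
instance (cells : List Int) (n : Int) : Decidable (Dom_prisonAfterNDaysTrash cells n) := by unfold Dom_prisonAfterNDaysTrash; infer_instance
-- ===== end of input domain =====

-- B replaces A's n-iteration loop (with its string-keyed memo dict) by the closed-form
-- cycle length: one step into the period-14 cycle, then (n-1) % 14 further steps (faster).


-- ===== PORT A =====
-- hash(arr) = ''.join([str(e) for e in arr])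
def pvHash (arr : List Int) : String :=
  PySem.Str.join "" (arr.map (fun e => PySem.Int.toStr e))

-- update(arr): newarr = [0]*8; for i in range(1,7): newarr[i] = 1 if arr[i-1]==arr[i+1] else 0
-- (arr[i-1]/arr[i+1] via pyGet?; .getD 0 is unreachable under Pre_, where all indices are in range)
def pvUpdate (arr : List Int) : List Int :=
  (PySem.List.pyRange 1 7 1).foldl
    (fun newarr i =>
      PySem.List.pySetD newarr i
        (if (PySem.List.pyGet? arr (i - 1)).getD 0 = (PySem.List.pyGet? arr (i + 1)).getD 0
         then (1 : Int) else 0))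
    (List.replicate 8 (0 : Int))

-- one iteration of A's loop body over the state (cells, d)
def pvBodyA (st : List Int × PySem.Dict String (List Int)) :
    List Int × PySem.Dict String (List Int) :=
  let hashed := pvHash st.1
  match st.2.get? hashed with
  | some v => (v, st.2)
  | none =>
    let c := pvUpdate st.1
    (c, st.2.setdefault hashed c)

def prisonAfterNDaysTrash (cells : List Int) (n : Int) : List Int :=
  ((PySem.List.pyRange 0 n 1).foldl (fun st _ => pvBodyA st)
      (cells, (PySem.Dict.empty : PySem.Dict String (List Int)))).1

-- ===== PORT B =====
-- step(a) = [0] + [1 if a[i-1]==a[i+1] else 0 for i in range(1,7)] + [0]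
def pvStep (a : List Int) : List Int :=
  [0] ++ (PySem.List.pyRange 1 7 1).map
      (fun i => if (PySem.List.pyGet? a (i - 1)).getD 0 = (PySem.List.pyGet? a (i + 1)).getD 0
                then (1 : Int) else 0)
    ++ [0]

def prisonAfterNDaysTrash_alt (cells : List Int) (n : Int) : List Int :=
  if n ≤ 0 then cells
  else
    (PySem.List.pyRange 0 (PySem.Int.mod (n - 1) 14) 1).foldl
      (fun c _ => pvStep c) (pvStep cells)

-- ===== PRECONDITION & SPEC =====
-- Pre_ excludes exactly the inputs where the Python A raises IndexError:
-- n ≥ 1 with fewer than 8 cells (update reads arr[0]..arr[7]).  B raises there too.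
def Pre_prisonAfterNDaysTrash (cells : List Int) (n : Int) : Prop :=
  n ≤ 0 ∨ 8 ≤ cells.length
instance (cells : List Int) (n : Int) : Decidable (Pre_prisonAfterNDaysTrash cells n) := by
  unfold Pre_prisonAfterNDaysTrash; infer_instance

def pvWitness_prisonAfterNDaysTrash : List Int × Int := ([0, 1, 0, 1, 1, 0, 0, 1], 3)

def Spec_prisonAfterNDaysTrash (cells : List Int) (n : Int) (out : List Int) : Prop := out = prisonAfterNDaysTrash_alt cells n
instance (cells : List Int) (n : Int) (out : List Int) : Decidable (Spec_prisonAfterNDaysTrash cells n out) := by unfold Spec_prisonAfterNDaysTrash; infer_instance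

-- ===== CLAIM (what is proved, stated in full; the proofs are below) =====
def Claim_equal_prisonAfterNDaysTrash : Prop := ∀ (cells : List Int) (n : Int), Dom_prisonAfterNDaysTrash cells n → Pre_prisonAfterNDaysTrash cells n → Spec_prisonAfterNDaysTrash cells n (prisonAfterNDaysTrash cells n)

-- ===== LEMMAS AND PROOFS =====

-- the shape of every state produced by update/step: [0, six 0/1 flags, 0]
def pvMk (b1 b2 b3 b4 b5 b6 : Bool) : List Int :=
  [0, cond b1 1 0, cond b2 1 0, cond b3 1 0, cond b4 1 0, cond b5 1 0, cond b6 1 0, 0]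

def pvG (a : List Int) (i : Int) : Int := (PySem.List.pyGet? a i).getD 0

lemma pvUpdate_eq (a : List Int) :
    pvUpdate a = pvMk (decide (pvG a 0 = pvG a 2)) (decide (pvG a 1 = pvG a 3))
      (decide (pvG a 2 = pvG a 4)) (decide (pvG a 3 = pvG a 5))
      (decide (pvG a 4 = pvG a 6)) (decide (pvG a 5 = pvG a 7)) := by
  have hr : PySem.List.pyRange 1 7 1 = [1, 2, 3, 4, 5, 6] := by decide
  simp only [pvUpdate, hr, List.foldl_cons, List.foldl_nil]
  norm_num [PySem.List.pySetD_of_nonneg, pvMk, pvG, Bool.cond_decide]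
  rfl

lemma pvStep_eq_pvUpdate : pvStep = pvUpdate := by
  funext a
  rw [pvUpdate_eq]
  have hr : PySem.List.pyRange 1 7 1 = [1, 2, 3, 4, 5, 6] := by decide
  simp only [pvStep, hr, List.map_cons, List.map_nil]
  norm_num [pvMk, pvG, Bool.cond_decide]

lemma pvUpdate_mk (a : List Int) : ∃ b1 b2 b3 b4 b5 b6, pvUpdate a = pvMk b1 b2 b3 b4 b5 b6 :=
  ⟨_, _, _, _, _, _, pvUpdate_eq a⟩

lemma pvPeriod : ∀ b1 b2 b3 b4 b5 b6, pvUpdate^[14] (pvMk b1 b2 b3 b4 b5 b6) = pvMk b1 b2 b3 b4 b5 b6 := by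
  decide

lemma pvU14 (x : List Int) : pvUpdate^[14] (pvUpdate x) = pvUpdate x := by
  obtain ⟨b1, b2, b3, b4, b5, b6, h⟩ := pvUpdate_mk x
  rw [h]; exact pvPeriod b1 b2 b3 b4 b5 b6

lemma pvIterRed : ∀ (m : Nat) (x : List Int), pvUpdate^[m + 1] x = pvUpdate^[m % 14 + 1] x := by
  intro m
  induction m using Nat.strong_induction_on with
  | _ m ih =>
    intro x
    by_cases h : m < 14
    · rw [Nat.mod_eq_of_lt h]
    · have h15 : m + 1 = (m - 14) + 15 := by omega
      have : pvUpdate^[15] x = pvUpdate x := by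
        have : (15 : Nat) = 14 + 1 := rfl
        rw [this, Function.iterate_add_apply]
        exact pvU14 x
      rw [h15, Function.iterate_add_apply, this, ← Function.iterate_succ_apply]
      rw [ih (m - 14) (by omega) x]
      congr 2
      omega

lemma pvFoldlConst {α β : Type} (l : List α) (F : β → β) (s : β) :
    l.foldl (fun s _ => F s) s = F^[l.length] s := by
  induction l generalizing s with
  | nil => rfl
  | cons x xs ih => simp [List.foldl_cons, ih, Function.iterate_succ_apply]

-- ---------- str(e)-concatenation facts ----------

def pvCs (l : List Int) : List Char := (l.map PySem.Int.toChars).flatten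

lemma pvJoinNil : ∀ ps : List (List Char), PySem.Chars.join [] ps = ps.flatten := by
  intro ps
  induction ps with
  | nil => simp [PySem.Chars.join_nil]
  | cons p ps ih =>
    cases ps with
    | nil => simp [PySem.Chars.join_singleton]
    | cons q rest =>
      rw [PySem.Chars.join_cons_cons]
      simp only [List.flatten_cons] at ih ⊢
      rw [ih]
      simp

lemma pvHash_toList (l : List Int) : (pvHash l).toList = pvCs l := by
  unfold pvHash pvCs
  rw [PySem.Str.toList_join]
  simp only [List.map_map]
  rw [show ("" : String).toList = [] from rfl, pvJoinNil]
  congr 1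
  simp [Function.comp, PySem.Int.toList_toStr]

-- reference decimal-digits function, and Nat.toDigits agrees with it
def pvDig (n : Nat) : List Char :=
  if _h : n < 10 then [Nat.digitChar n]
  else pvDig (n / 10) ++ [Nat.digitChar (n % 10)]
termination_by n
decreasing_by exact Nat.div_lt_self (by omega) (by omega)

lemma pvCore_eq : ∀ (fuel n : Nat) (ds : List Char), n < fuel →
    Nat.toDigitsCore 10 fuel n ds = pvDig n ++ ds := by
  intro fuel
  induction fuel with
  | zero => intro n ds h; omega
  | succ f ih =>
    intro n ds h
    rw [show Nat.toDigitsCore 10 (f + 1) n ds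
        = (if n / 10 = 0 then (n % 10).digitChar :: ds
           else Nat.toDigitsCore 10 f (n / 10) ((n % 10).digitChar :: ds)) from rfl]
    by_cases h0 : n / 10 = 0
    · have hlt : n < 10 := by omega
      rw [if_pos h0]
      rw [pvDig, dif_pos hlt, Nat.mod_eq_of_lt hlt]
      rfl
    · have hlt : ¬ n < 10 := by omega
      have hf : n / 10 < f := by
        have := Nat.div_lt_self (n := n) (by omega) (by omega : 1 < 10)
        omega
      rw [if_neg h0, ih _ _ hf]
      conv_rhs => rw [pvDig, dif_neg hlt]
      simp

lemma pvDig_ne_nil (n : Nat) : pvDig n ≠ [] := by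
  unfold pvDig; split <;> simp

lemma pvDig_singleton {n : Nat} {c : Char} (h : pvDig n = [c]) : n < 10 ∧ c = Nat.digitChar n := by
  by_cases hlt : n < 10
  · rw [pvDig, dif_pos hlt] at h
    exact ⟨hlt, by simpa using h.symm⟩
  · rw [pvDig, dif_neg hlt] at h
    exfalso
    have := pvDig_ne_nil (n / 10)
    rcases List.exists_cons_of_ne_nil this with ⟨a, t, ht⟩
    rw [ht] at h
    simp at h

lemma pvToChars_ne_nil (e : Int) : PySem.Int.toChars e ≠ [] := by
  unfold PySem.Int.toChars
  split
  · simp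
  · rw [show Nat.toDigits 10 e.toNat = Nat.toDigitsCore 10 (e.toNat + 1) e.toNat [] from rfl,
      pvCore_eq _ _ _ (by omega)]
    simp [pvDig_ne_nil]

lemma pvToChars_digit {e : Int} {c : Char} (h : PySem.Int.toChars e = [c]) :
    0 ≤ e ∧ e.toNat < 10 ∧ c = Nat.digitChar e.toNat := by
  unfold PySem.Int.toChars at h
  split at h
  · exfalso
    have h2 : Nat.toDigits 10 e.natAbs = [] := by injection h
    rw [show Nat.toDigits 10 e.natAbs = Nat.toDigitsCore 10 (e.natAbs + 1) e.natAbs [] from rfl,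
      pvCore_eq _ _ _ (by omega)] at h2
    simp [pvDig_ne_nil] at h2
  · rw [show Nat.toDigits 10 e.toNat = Nat.toDigitsCore 10 (e.toNat + 1) e.toNat [] from rfl,
      pvCore_eq _ _ _ (by omega)] at h
    simp only [List.append_nil] at h
    obtain ⟨h1, h2⟩ := pvDig_singleton h
    exact ⟨by omega, h1, h2⟩

lemma pvDigitChar_zero : ∀ k : Nat, k < 10 → Nat.digitChar k = '0' → k = 0 := by decide

lemma pvDigitChar_one : ∀ k : Nat, k < 10 → Nat.digitChar k = '1' → k = 1 := by decide

lemma pvToChars_zero {e : Int} (h : PySem.Int.toChars e = ['0']) : e = 0 := by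
  obtain ⟨h0, hlt, hc⟩ := pvToChars_digit h
  have := pvDigitChar_zero e.toNat hlt hc.symm
  omega

lemma pvToChars_one {e : Int} (h : PySem.Int.toChars e = ['1']) : e = 1 := by
  obtain ⟨h0, hlt, hc⟩ := pvToChars_digit h
  have := pvDigitChar_one e.toNat hlt hc.symm
  omega

lemma pvLenGe (l : List Int) : l.length ≤ (pvCs l).length := by
  induction l with
  | nil => simp [pvCs]
  | cons y l ih =>
    have := pvToChars_ne_nil y
    simp only [pvCs, List.map_cons, List.flatten_cons, List.length_append, List.length_cons]
    have h1 : 1 ≤ (PySem.Int.toChars y).length := by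
      cases hy : PySem.Int.toChars y with
      | nil => exact absurd hy this
      | cons a t => simp
    have := ih
    simp only [pvCs] at this
    omega

lemma pvLen01 (m : List Int) (h : ∀ x ∈ m, x = 0 ∨ x = 1) : (pvCs m).length = m.length := by
  induction m with
  | nil => simp [pvCs]
  | cons x m ih =>
    have hx := h x (by simp)
    have hlen : (PySem.Int.toChars x).length = 1 := by
      rcases hx with h0 | h0 <;> subst h0 <;> decide
    simp only [pvCs, List.map_cons, List.flatten_cons, List.length_append, List.length_cons, hlen]
    have := ih (fun y hy => h y (by simp [hy]))
    simp only [pvCs] at this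
    omega

lemma pvToChars01 {x : Int} (h : x = 0 ∨ x = 1) :
    PySem.Int.toChars x = ['0'] ∨ PySem.Int.toChars x = ['1'] := by
  rcases h with h | h <;> subst h
  · left; decide
  · right; decide

lemma pvCsInj : ∀ (m l : List Int), (∀ x ∈ m, x = 0 ∨ x = 1) → m.length ≤ l.length →
    pvCs l = pvCs m → l = m := by
  intro m
  induction m with
  | nil =>
    intro l _ _ hcs
    cases l with
    | nil => rfl
    | cons y l' =>
      exfalso
      simp only [pvCs, List.map_cons, List.flatten_cons, List.map_nil, List.flatten_nil] at hcs
      rcases List.exists_cons_of_ne_nil (pvToChars_ne_nil y) with ⟨a, t, ht⟩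
      rw [ht] at hcs
      simp at hcs
  | cons x m' ih =>
    intro l h01 hlen hcs
    cases l with
    | nil => simp at hlen
    | cons y l' =>
      have hx01 := h01 x (by simp)
      have hxc := pvToChars01 hx01
      have hm'01 : ∀ z ∈ m', z = 0 ∨ z = 1 := fun z hz => h01 z (by simp [hz])
      have hLl' : l'.length ≤ (pvCs l').length := pvLenGe l'
      rcases List.exists_cons_of_ne_nil (pvToChars_ne_nil y) with ⟨a, t, ht⟩
      have hcs' : (PySem.Int.toChars y) ++ pvCs l' = (PySem.Int.toChars x) ++ pvCs m' := by
        simpa [pvCs] using hcs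
      have hLm' : (pvCs m').length = m'.length := pvLen01 _ hm'01
      have hlen2 : (PySem.Int.toChars y).length + (pvCs l').length = 1 + m'.length := by
        have hx1 : (PySem.Int.toChars x).length = 1 := by
          rcases hxc with h | h <;> rw [h] <;> rfl
        have := congrArg List.length hcs'
        simp only [List.length_append] at this
        omega
      have hlenl' : m'.length ≤ l'.length := by simpa using hlen
      have hy1 : (PySem.Int.toChars y).length = 1 := by
        rw [ht] at hlen2 ⊢
        simp only [List.length_cons] at hlen2 ⊢
        omega
      have htnil : t = [] := by
        rw [ht] at hy1; simp at hy1; exact hy1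
      have hyx : PySem.Int.toChars y = PySem.Int.toChars x := by
        rcases hxc with h | h <;> rw [h] at hcs' ⊢ <;>
          (rw [ht, htnil] at hcs'; simp at hcs'; rw [ht, htnil, hcs'.1])
      have hyeq : y = x := by
        rcases hxc with h | h
        · rw [h] at hyx; rw [pvToChars_zero hyx, pvToChars_zero h]
        · rw [h] at hyx; rw [pvToChars_one hyx, pvToChars_one h]
      have hrest : pvCs l' = pvCs m' := by
        rw [hyx] at hcs'
        exact List.append_cancel_left hcs'
      rw [hyeq, ih l' hm'01 hlenl' hrest]

lemma pvMk01 (b1 b2 b3 b4 b5 b6 : Bool) : ∀ x ∈ pvMk b1 b2 b3 b4 b5 b6, x = 0 ∨ x = 1 := by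
  have c01 : ∀ b : Bool, (cond b (1 : Int) 0) = 0 ∨ cond b (1 : Int) 0 = 1 := by decide
  intro x hx
  simp only [pvMk, List.mem_cons] at hx
  rcases hx with h | h | h | h | h | h | h | h
  · subst h; left; rfl
  · subst h; exact c01 b1
  · subst h; exact c01 b2
  · subst h; exact c01 b3
  · subst h; exact c01 b4
  · subst h; exact c01 b5
  · subst h; exact c01 b6
  · simp at h; subst h; left; rfl

lemma pvHashInj {l : List Int} {b1 b2 b3 b4 b5 b6 : Bool} (h8 : 8 ≤ l.length)
    (h : pvHash l = pvHash (pvMk b1 b2 b3 b4 b5 b6)) : l = pvMk b1 b2 b3 b4 b5 b6 := by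
  have hch : pvCs l = pvCs (pvMk b1 b2 b3 b4 b5 b6) := by
    rw [← pvHash_toList, ← pvHash_toList, h]
  exact pvCsInj _ _ (pvMk01 b1 b2 b3 b4 b5 b6) (by simp [pvMk]; omega) hch

-- ---------- the loop invariant for A ----------

def pvInv (c0 : List Int) (k : Nat) (st : List Int × PySem.Dict String (List Int)) : Prop :=
  st.1 = pvUpdate^[k] c0 ∧
  ∀ key v, st.2.get? key = some v →
    ∃ j, j < k ∧ key = pvHash (pvUpdate^[j] c0) ∧ v = pvUpdate^[j + 1] c0

lemma pvIterLen (c0 : List Int) (h8 : 8 ≤ c0.length) (i : Nat) :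
    8 ≤ (pvUpdate^[i] c0).length := by
  cases i with
  | zero => exact h8
  | succ i =>
    rw [Function.iterate_succ_apply']
    obtain ⟨b1, b2, b3, b4, b5, b6, hb⟩ := pvUpdate_mk (pvUpdate^[i] c0)
    rw [hb]; simp [pvMk]

lemma pvInvStep (c0 : List Int) (h8 : 8 ≤ c0.length) (k : Nat)
    (st : List Int × PySem.Dict String (List Int)) (h : pvInv c0 k st) :
    pvInv c0 (k + 1) (pvBodyA st) := by
  obtain ⟨h1, h2⟩ := h
  cases hget : st.2.get? (pvHash st.1) with
  | none =>
    have hcon : st.2.contains (pvHash st.1) = false := by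
      rw [PySem.Dict.contains_eq_isSome_get?, hget]; rfl
    constructor
    · show (pvBodyA st).1 = _
      simp only [pvBodyA, hget]
      rw [h1]
      exact (Function.iterate_succ_apply' _ _ _).symm
    · intro key v hv
      simp only [pvBodyA, hget] at hv
      rw [PySem.Dict.setdefault_of_not_contains _ _ hcon, PySem.Dict.get?_insert] at hv
      split at hv
      · rename_i heq
        refine ⟨k, by omega, ?_, ?_⟩
        · rw [heq, h1]
        · have : v = pvUpdate st.1 := by injection hv with h'; exact h'.symm
          rw [this, h1]
          exact (Function.iterate_succ_apply' _ _ _).symm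
      · obtain ⟨j, hj, hk, hvv⟩ := h2 key v hv
        exact ⟨j, by omega, hk, hvv⟩
  | some w =>
    obtain ⟨j, hj, hkey, hw⟩ := h2 _ _ hget
    obtain ⟨b1, b2, b3, b4, b5, b6, hb⟩ := pvUpdate_mk (pvUpdate^[k - 1] c0)
    have hkmk : pvUpdate^[k] c0 = pvMk b1 b2 b3 b4 b5 b6 := by
      conv_lhs => rw [show k = (k - 1) + 1 from by omega, Function.iterate_succ_apply']
      exact hb
    have hhash : pvHash (pvUpdate^[j] c0) = pvHash (pvUpdate^[k] c0) := by
      rw [← hkey, h1]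
    have hjk : pvUpdate^[j] c0 = pvUpdate^[k] c0 := by
      rw [hkmk] at hhash ⊢
      exact pvHashInj (pvIterLen c0 h8 j) hhash
    constructor
    · show (pvBodyA st).1 = _
      simp only [pvBodyA, hget]
      rw [hw, Function.iterate_succ_apply', Function.iterate_succ_apply', hjk]
    · intro key v hv
      simp only [pvBodyA, hget] at hv
      obtain ⟨j', hj', hk', hvv⟩ := h2 key v hv
      exact ⟨j', by omega, hk', hvv⟩

lemma pvLoopA (c0 : List Int) (h8 : 8 ≤ c0.length) (k : Nat) :
    pvInv c0 k (pvBodyA^[k] (c0, (PySem.Dict.empty : PySem.Dict String (List Int)))) := by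
  induction k with
  | zero =>
    constructor
    · rfl
    · intro key v hv
      simp [PySem.Dict.get?_empty] at hv
  | succ k ih =>
    rw [Function.iterate_succ_apply']
    exact pvInvStep c0 h8 k _ ih

-- ===== VERDICT (by name: the statement is the Claim_ definition above) =====
theorem prisonAfterNDaysTrash_spec : Claim_equal_prisonAfterNDaysTrash := by
  intro cells n _ hpre
  unfold Spec_prisonAfterNDaysTrash
  by_cases hn : n ≤ 0
  · have h1 : PySem.List.pyRange 0 n 1 = [] := PySem.List.pyRange_one_eq_nil (by omega)
    simp [prisonAfterNDaysTrash, prisonAfterNDaysTrash_alt, hn, h1]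
  · have h8 : 8 ≤ cells.length := by
      rcases hpre with h | h
      · omega
      · exact h
    have hA : prisonAfterNDaysTrash cells n = pvUpdate^[n.toNat] cells := by
      have hlen : (PySem.List.pyRange 0 n 1).length = n.toNat := by
        rw [PySem.List.length_pyRange_one]; omega
      unfold prisonAfterNDaysTrash
      rw [pvFoldlConst, hlen]
      exact (pvLoopA cells h8 n.toNat).1
    have hB : prisonAfterNDaysTrash_alt cells n
        = pvUpdate^[(PySem.Int.mod (n - 1) 14).toNat + 1] cells := by
      unfold prisonAfterNDaysTrash_alt
      rw [if_neg hn, pvFoldlConst, pvStep_eq_pvUpdate, PySem.List.length_pyRange_one,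
        ← Function.iterate_succ_apply]
      congr 1
      omega
    rw [hA, hB]
    have hm : (PySem.Int.mod (n - 1) 14).toNat = (n.toNat - 1) % 14 := by
      rw [PySem.Int.mod_eq_emod_of_pos (by omega)]
      omega
    rw [hm]
    conv_lhs => rw [show n.toNat = (n.toNat - 1) + 1 from by omega]
    exact pvIterRed (n.toNat - 1) cells
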